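-- pv_equiv track=rewrite | github.com/saychuwho/auto_grading_release | functions.py | __find_function_block
-- ===== SOURCE A (Python) =====
-- def __find_function_block(file_content: list, function_pattern, function_pattern_alter=None):
--     inside_function = False
--     function_name = ""
--     function_block = ""
--     brace_count = 0
--     brace_open_count = 0
--
--     for line in file_content:
--         if not inside_function:
--             if function_pattern in line or (function_pattern_alter != None and function_pattern_alter in line):
--                 # exclude class pattern that have ; inside
--                 if f"{function_pattern_alter};" in line: continue
--
--                 inside_function = True
--
--                 function_name = line.strip()
--                 function_block = function_name + "\n"
--
--                 # check if function is end at here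
--                 if '{' in function_name:
--                     brace_count += line.count('{')
--                     brace_open_count += line.count('{')
--                     brace_count -= line.count('}')
--                     if brace_count == 0:
--                         inside_function = False
--                         break
--
--         else:
--             tmp_line = line
--             function_block += tmp_line
--
--             brace_count += line.count('{')
--             brace_open_count += line.count('{')
--             brace_count -= line.count('}')
--
--             if brace_open_count > 0 and brace_count == 0:
--                 inside_function = False
--                 break
--
--     return function_block
-- ===== SOURCE B (Python) =====
-- def __find_function_block(file_content: list, function_pattern, function_pattern_alter=None):
--     # Phase 1: find index and text of the start line.
--     hit = next(((i, ln) for i, ln in enumerate(file_content)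
--                 if (function_pattern in ln
--                     or (function_pattern_alter is not None and function_pattern_alter in ln))
--                 and f"{function_pattern_alter};" not in ln), None)
--     if hit is None:
--         return ""
--     start, raw = hit
--     head = raw.strip()
--     if '{' in head:
--         o0 = raw.count('{')
--         b0 = o0 - raw.count('}')
--         if b0 == 0:
--             return head + "\n"
--     else:
--         o0, b0 = 0, 0
--     # Phase 2: prefix sums of brace counts over the remaining lines,
--     # then cut at the first position where the braces close.
--     tail = file_content[start + 1:]
--     cums = []
--     o, b = o0, b0
--     for ln in tail:
--         o += ln.count('{')
--         b += ln.count('{') - ln.count('}')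
--         cums.append((o, b))
--     end = next((j for j, (co, cb) in enumerate(cums) if co > 0 and cb == 0), len(tail))
--     return head + "\n" + "".join(tail[:end + 1])
-- ===== Notes on version B (the rewrite author's own statement) =====
-- stated objective: alternative
-- what changed: Instead of A's single stateful scan that builds the block string incrementally and breaks out of the loop, B finds the start line, precomputes the prefix sums of per-line brace counts for the remaining lines, locates the closing cut index in that table, and assembles the result once with a slice and join.
import Mathlib
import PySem

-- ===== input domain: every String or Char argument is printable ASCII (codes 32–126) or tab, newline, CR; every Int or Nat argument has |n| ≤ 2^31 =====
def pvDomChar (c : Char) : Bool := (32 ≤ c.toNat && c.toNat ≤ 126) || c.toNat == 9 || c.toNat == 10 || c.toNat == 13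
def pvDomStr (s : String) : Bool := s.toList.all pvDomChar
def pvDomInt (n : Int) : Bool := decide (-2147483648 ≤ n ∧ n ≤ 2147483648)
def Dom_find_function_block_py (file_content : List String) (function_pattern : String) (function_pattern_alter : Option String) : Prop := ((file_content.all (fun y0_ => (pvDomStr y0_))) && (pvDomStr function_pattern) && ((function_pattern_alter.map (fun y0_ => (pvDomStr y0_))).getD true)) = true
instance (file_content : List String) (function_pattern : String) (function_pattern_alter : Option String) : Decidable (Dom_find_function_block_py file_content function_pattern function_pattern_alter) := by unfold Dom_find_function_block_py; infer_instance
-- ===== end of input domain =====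

-- B replaces A's stateful scan that builds the block incrementally with: find the start line,
-- tabulate prefix sums of brace counts, locate the closing cut index, assemble with slice + join.
-- Same return value ('alternative' objective).

-- ===== PORT A =====
-- f"{function_pattern_alter};" : Python str() of None is "None"
def pvSentinel (alter : Option String) : String :=
  (match alter with | some s => s | none => "None") ++ ";"

-- the pattern-match test 'function_pattern in line or (alter != None and alter in line)'
def pvMatches (pat : String) (alter : Option String) (line : String) : Bool :=
  PySem.Str.isIn pat line ||
    (match alter with | some a => PySem.Str.isIn a line | none => false)

-- the for-loop of A, state = (inside_function, function_block, brace_count, brace_open_count)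
def pvALoop (pat : String) (alter : Option String) :
    List String → Bool → String → Int → Int → String
  | [], _, block, _, _ => block
  | line :: rest, inside, block, bc, boc =>
    if !inside then
      if pvMatches pat alter line then
        if PySem.Str.isIn (pvSentinel alter) line then
          pvALoop pat alter rest false block bc boc
        else
          let name := PySem.Str.strip line
          let block' := name ++ "\n"
          if PySem.Str.isIn "{" name then
            let bc' := bc + (PySem.Str.count line "{" : Int) - (PySem.Str.count line "}" : Int)
            let boc' := boc + (PySem.Str.count line "{" : Int)
            if bc' = 0 then block'
            else pvALoop pat alter rest true block' bc' boc'
          else pvALoop pat alter rest true block' bc boc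
      else pvALoop pat alter rest false block bc boc
    else
      let block' := block ++ line
      let bc' := bc + (PySem.Str.count line "{" : Int) - (PySem.Str.count line "}" : Int)
      let boc' := boc + (PySem.Str.count line "{" : Int)
      if boc' > 0 ∧ bc' = 0 then block'
      else pvALoop pat alter rest true block' bc' boc'

def find_function_block_py (file_content : List String) (function_pattern : String) (function_pattern_alter : Option String) : String :=
  pvALoop function_pattern function_pattern_alter file_content false "" 0 0

-- ===== PORT B =====
-- Phase 1 of Source B: next(((i, ln) for i, ln in enumerate(file_content) if …), None)
def pvFindHit (pat : String) (alter : Option String) :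
    List String → Option (Nat × String)
  | [] => none
  | line :: rest =>
    if pvMatches pat alter line && !PySem.Str.isIn (pvSentinel alter) line then
      some (0, line)
    else (pvFindHit pat alter rest).map (fun p => (p.1 + 1, p.2))

-- Phase 2 of Source B: the loop appending (o, b) prefix-sum pairs to cums
def pvCums : List String → Int → Int → List (Int × Int)
  | [], _, _ => []
  | ln :: rest, o, b =>
    let o' := o + (PySem.Str.count ln "{" : Int)
    let b' := b + (PySem.Str.count ln "{" : Int) - (PySem.Str.count ln "}" : Int)
    (o', b') :: pvCums rest o' b'

def find_function_block_py_alt (file_content : List String) (function_pattern : String) (function_pattern_alter : Option String) : String :=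
  match pvFindHit function_pattern function_pattern_alter file_content with
  | none => ""
  | some (start, raw) =>
    let head := PySem.Str.strip raw
    let o0 : Int := if PySem.Str.isIn "{" head then (PySem.Str.count raw "{" : Int) else 0
    let b0 : Int := if PySem.Str.isIn "{" head then o0 - (PySem.Str.count raw "}" : Int) else 0
    if PySem.Str.isIn "{" head ∧ b0 = 0 then head ++ "\n"
    else
      -- tail = file_content[start+1:]
      let tail := PySem.List.slice file_content (some ((start + 1 : Nat) : Int)) none
      let cums := pvCums tail o0 b0
      -- end = next((j for j,(co,cb) in enumerate(cums) if co>0 and cb==0), len(tail))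
      let endIdx := (List.findIdx? (fun p => decide (0 < p.1) && decide (p.2 = 0)) cums).getD tail.length
      -- tail[:end+1] is List.take (end+1) (nonnegative bound); "".join → PySem.Str.join
      head ++ "\n" ++ PySem.Str.join "" (tail.take (endIdx + 1))

-- ===== PRECONDITION & SPEC =====
def Spec_find_function_block_py (file_content : List String) (function_pattern : String) (function_pattern_alter : Option String) (out : String) : Prop := out = find_function_block_py_alt file_content function_pattern function_pattern_alter
instance (file_content : List String) (function_pattern : String) (function_pattern_alter : Option String) (out : String) : Decidable (Spec_find_function_block_py file_content function_pattern function_pattern_alter out) := by unfold Spec_find_function_block_py; infer_instance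

-- ===== CLAIM (what is proved, stated in full; the proofs are below) =====
def Claim_equal_find_function_block_py : Prop := ∀ (file_content : List String) (function_pattern : String) (function_pattern_alter : Option String), Dom_find_function_block_py file_content function_pattern function_pattern_alter → Spec_find_function_block_py file_content function_pattern function_pattern_alter (find_function_block_py file_content function_pattern function_pattern_alter)

-- ===== LEMMAS AND PROOFS =====

-- proof-side helper: the incremental accumulator both proofs factor through
def pvBAccum : List String → String → Int → Int → String
  | [], block, _, _ => block
  | line :: rest, block, opens, bal =>
    let block' := block ++ line
    let opens' := opens + (PySem.Str.count line "{" : Int)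
    let bal' := bal + (PySem.Str.count line "{" : Int) - (PySem.Str.count line "}" : Int)
    if opens' > 0 ∧ bal' = 0 then block'
    else pvBAccum rest block' opens' bal'

-- A's inside-the-function loop is the accumulator
theorem pvALoop_inside_eq (pat : String) (alter : Option String) :
    ∀ (l : List String) (block : String) (bc boc : Int),
      pvALoop pat alter l true block bc boc = pvBAccum l block boc bc := by
  intro l
  induction l with
  | nil => intro block bc boc; rfl
  | cons line rest ih =>
    intro block bc boc
    simp only [pvALoop, pvBAccum, Bool.not_true, Bool.false_eq_true, if_false]
    split
    · rfl
    · exact ih _ _ _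

theorem pvJoin_empty_cons (a : String) (t : List String) :
    PySem.Str.join "" (a :: t) = a ++ PySem.Str.join "" t := by
  have h : (PySem.Str.join "" (a :: t)).toList = (a ++ PySem.Str.join "" t).toList := by
    cases t with
    | nil => simp [PySem.Str.toList_join, PySem.Chars.join_singleton]
    | cons b t' =>
      simp only [PySem.Str.toList_join, List.map_cons, PySem.Chars.join_cons_cons,
        String.toList_append]
      simp
  exact String.toList_inj.mp h

theorem pvJoin_empty_nil : PySem.Str.join "" ([] : List String) = "" := rfl

-- the accumulator equals the prefix-sum table cut that B computes
theorem pvBAccum_eq_cut :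
    ∀ (l : List String) (block : String) (o b : Int),
      pvBAccum l block o b =
        block ++ PySem.Str.join ""
          (l.take (((List.findIdx? (fun p => decide (0 < p.1) && decide (p.2 = 0)) (pvCums l o b)).getD l.length) + 1)) := by
  intro l
  induction l with
  | nil =>
    intro block o b
    simp [pvBAccum, pvCums, pvJoin_empty_nil]
  | cons ln rest ih =>
    intro block o b
    simp only [pvBAccum, pvCums, List.findIdx?_cons]
    by_cases hc : (0 : Int) < o + (PySem.Str.count ln "{" : Int) ∧
        b + (PySem.Str.count ln "{" : Int) - (PySem.Str.count ln "}" : Int) = 0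
    · simp only [hc, decide_true]
      simp [pvJoin_empty_cons, pvJoin_empty_nil]
    · have hb : (decide ((0:Int) < o + (PySem.Str.count ln "{" : Int)) &&
          decide (b + (PySem.Str.count ln "{" : Int) - (PySem.Str.count ln "}" : Int) = 0)) = false := by
        simp only [Bool.eq_false_iff, ne_eq, Bool.and_eq_true, decide_eq_true_eq]
        exact hc
      rw [if_neg hc, hb]
      simp only [Bool.false_eq_true, if_false, List.length_cons]
      rw [ih]
      have hg : ∀ (x : Option Nat),
          (Option.map (fun i => i + 1) x).getD (rest.length + 1) = x.getD rest.length + 1 := by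
        intro x; cases x <;> simp
      rw [hg, List.take_succ_cons, pvJoin_empty_cons]
      rw [← String.append_assoc]

-- B on a list whose head is not a hit equals B on the tail
theorem pvAlt_skip (pat : String) (alter : Option String) (line : String) (rest : List String)
    (h : ¬ (pvMatches pat alter line && !PySem.Str.isIn (pvSentinel alter) line) = true) :
    find_function_block_py_alt (line :: rest) pat alter = find_function_block_py_alt rest pat alter := by
  unfold find_function_block_py_alt
  simp only [pvFindHit, if_neg h]
  cases hf : pvFindHit pat alter rest with
  | none => simp
  | some p =>
    obtain ⟨i, raw⟩ := p
    simp only [Option.map_some]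
    have hs : PySem.List.slice (line :: rest) (some ((i + 1 + 1 : Nat) : Int)) none
        = PySem.List.slice rest (some ((i + 1 : Nat) : Int)) none := by
      rw [PySem.List.slice_from_natCast, PySem.List.slice_from_natCast, List.drop_succ_cons]
    rw [hs]

-- the main equivalence, by induction over the file
theorem pvMain_eq (pat : String) (alter : Option String) :
    ∀ (l : List String), pvALoop pat alter l false "" 0 0 = find_function_block_py_alt l pat alter := by
  intro l
  induction l with
  | nil => rfl
  | cons line rest ih =>
    by_cases hhit : (pvMatches pat alter line && !PySem.Str.isIn (pvSentinel alter) line) = true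
    · -- the head line starts the block
      obtain ⟨hm, hns⟩ := Bool.and_eq_true_iff.mp hhit
      simp only [Bool.not_eq_eq_eq_not, Bool.not_true] at hns
      simp only [pvALoop, Bool.not_false, if_true, if_pos hm, hns, Bool.false_eq_true, if_false]
      unfold find_function_block_py_alt
      simp only [pvFindHit, if_pos hhit]
      have htail : PySem.List.slice (line :: rest) (some ((0 + 1 : Nat) : Int)) none = rest := by
        rw [PySem.List.slice_from_natCast]; rfl
      rw [htail]
      by_cases hb : PySem.Str.isIn "{" (PySem.Str.strip line) = true
      · simp only [hb, if_true, true_and]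
        by_cases hz : (PySem.Str.count line "{" : Int) - (PySem.Str.count line "}" : Int) = 0
        · have hz' : (0:Int) + (PySem.Str.count line "{" : Int) - (PySem.Str.count line "}" : Int) = 0 := by
            omega
          rw [if_pos hz', if_pos hz]
        · have hz' : ¬ ((0:Int) + (PySem.Str.count line "{" : Int) - (PySem.Str.count line "}" : Int) = 0) := by
            omega
          rw [if_neg hz', if_neg hz, pvALoop_inside_eq, pvBAccum_eq_cut]
          have h0 : (0:Int) + (PySem.Str.count line "{" : Int) = (PySem.Str.count line "{" : Int) := by omega
          rw [h0]
      · simp only [hb, Bool.false_eq_true, if_false, false_and]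
        rw [pvALoop_inside_eq, pvBAccum_eq_cut]
    · -- the head line is skipped
      rw [pvAlt_skip pat alter line rest hhit]
      rw [← ih]
      by_cases hm : pvMatches pat alter line = true
      · have hsent : PySem.Str.isIn (pvSentinel alter) line = true := by
          cases hsk : PySem.Str.isIn (pvSentinel alter) line with
          | true => rfl
          | false => exact absurd (by rw [hm, hsk]; rfl) hhit
        simp only [pvALoop, Bool.not_false, if_true]
        rw [if_pos hm, if_pos hsent]
      · simp only [Bool.not_eq_true] at hm
        simp only [pvALoop, Bool.not_false, if_true]
        rw [if_neg (by rw [hm]; exact Bool.false_ne_true)]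

-- ===== VERDICT (by name: the statement is the Claim_ definition above) =====
theorem find_function_block_py_spec : Claim_equal_find_function_block_py := by
  intro file_content pat alter _hDom
  unfold Spec_find_function_block_py find_function_block_py
  exact pvMain_eq pat alter file_content
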